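-- pv_equiv track=rewrite | github.com/tracemyyn/logslice | logslice/column.py | apply_column_args
-- ===== SOURCE A (Python) =====
-- from typing import Dict, Any, List, Optional
--
-- def select_columns(record: Dict[str, Any], columns: List[str]) -> Dict[str, Any]:
--     """Return a new record containing only the specified columns, in order."""
--     return {col: record[col] for col in columns if col in record}
--
-- def reorder_columns(record: Dict[str, Any], first: List[str]) -> Dict[str, Any]:
--     """Return record with `first` keys appearing before the rest."""
--     ordered = {k: record[k] for k in first if k in record}
--     ordered.update({k: v for k, v in record.items() if k not in ordered})
--     return ordered
--
-- def exclude_columns(record: Dict[str, Any], exclude: List[str]) -> Dict[str, Any]: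
--     """Return record with specified columns removed."""
--     return {k: v for k, v in record.items() if k not in exclude}
--
-- def apply_column_args(
--     records: List[Dict[str, Any]],
--     select: Optional[List[str]] = None,
--     exclude: Optional[List[str]] = None,
--     reorder: Optional[List[str]] = None,
-- ) -> List[Dict[str, Any]]:
--     """Apply column transformations to a list of records."""
--     result = []
--     for rec in records:
--         if select:
--             rec = select_columns(rec, select)
--         if exclude:
--             rec = exclude_columns(rec, exclude)
--         if reorder:
--             rec = reorder_columns(rec, reorder)
--         result.append(rec)
--     return result
-- ===== SOURCE B (Python) =====
-- def apply_column_args(records, select=None, exclude=None, reorder=None):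
--     """Rank-and-sort: keep a record key iff it passes select/exclude, then sort
--     the kept keys by one integer rank (reorder position first, then base
--     position) and project the record once; no staged dict rebuilds."""
--     re_list = reorder or []
--     n = len(re_list)
--     out = []
--     for rec in records:
--         keys = list(rec)
--         base = select if select else keys
--         def rank(k):
--             if k in re_list:
--                 return re_list.index(k)
--             return n + base.index(k)
--         kept = [k for k in keys
--                 if (not select or k in select) and (not exclude or k not in exclude)]
--         kept.sort(key=rank)
--         out.append({k: rec[k] for k in kept})
--     return out
-- ===== Notes on version B (the rewrite author's own statement) =====
-- stated objective: alternative
-- what changed: B replaces A's three staged dict rebuilds per record with a rank-and-sort algorithm: it filters the record's own keys by a select/exclude predicate, assigns each kept key one integer rank (position in reorder, else reorder-length plus position in select or in the record) and sorts the kept keys by that rank before a single projection.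
import Mathlib
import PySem

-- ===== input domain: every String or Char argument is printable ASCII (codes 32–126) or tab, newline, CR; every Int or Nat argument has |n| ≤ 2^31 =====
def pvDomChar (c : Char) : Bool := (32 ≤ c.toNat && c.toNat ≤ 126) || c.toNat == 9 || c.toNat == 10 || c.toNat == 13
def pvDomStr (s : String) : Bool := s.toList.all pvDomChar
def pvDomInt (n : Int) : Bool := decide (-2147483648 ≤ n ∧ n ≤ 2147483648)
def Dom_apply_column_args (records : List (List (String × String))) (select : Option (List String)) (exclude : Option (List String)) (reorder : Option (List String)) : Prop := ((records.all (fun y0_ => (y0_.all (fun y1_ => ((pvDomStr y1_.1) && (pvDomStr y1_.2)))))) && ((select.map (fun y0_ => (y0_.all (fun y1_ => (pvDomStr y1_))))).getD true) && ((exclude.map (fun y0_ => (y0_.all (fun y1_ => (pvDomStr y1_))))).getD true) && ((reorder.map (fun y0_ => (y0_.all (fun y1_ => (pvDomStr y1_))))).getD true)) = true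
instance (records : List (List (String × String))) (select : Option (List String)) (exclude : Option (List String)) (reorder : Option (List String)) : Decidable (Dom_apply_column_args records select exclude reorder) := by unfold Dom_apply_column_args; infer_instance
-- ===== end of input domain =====

-- B replaces A's three staged dict rebuilds per record by a rank-and-sort algorithm:
-- filter the record's keys by a select/exclude predicate, sort them by one integer rank.

-- ===== PORT A =====
-- select_columns: {col: record[col] for col in columns if col in record}
def pvSelectCols (record : PySem.Dict String String) (columns : List String) : PySem.Dict String String :=
  columns.foldl (fun acc col => if record.contains col then acc.insert col (record.getD col "") else acc) PySem.Dict.empty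

-- exclude_columns: {k: v for k, v in record.items() if k not in exclude}
def pvExcludeCols (record : PySem.Dict String String) (exclude : List String) : PySem.Dict String String :=
  record.items.foldl (fun acc p => if exclude.contains p.1 then acc else acc.insert p.1 p.2) PySem.Dict.empty

-- reorder_columns: ordered = {k: record[k] for k in first if k in record}; ordered.update({k: v for k, v in record.items() if k not in ordered})
def pvReorderCols (record : PySem.Dict String String) (first : List String) : PySem.Dict String String :=
  let ordered := first.foldl (fun acc k => if record.contains k then acc.insert k (record.getD k "") else acc) PySem.Dict.empty
  record.items.foldl (fun acc p => if ordered.contains p.1 then acc else acc.insert p.1 p.2) ordered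

def apply_column_args (records : List (List (String × String))) (select : Option (List String)) (exclude : Option (List String)) (reorder : Option (List String)) : List (List (String × String)) :=
  records.map (fun recL =>
    let rec0 := PySem.Dict.ofList recL
    let rec1 := match select with | some (c :: cs) => pvSelectCols rec0 (c :: cs) | _ => rec0
    let rec2 := match exclude with | some (c :: cs) => pvExcludeCols rec1 (c :: cs) | _ => rec1
    let rec3 := match reorder with | some (c :: cs) => pvReorderCols rec2 (c :: cs) | _ => rec2
    rec3.items)

-- ===== PORT B =====
-- Python truthiness of an optional list ('if select:' etc.)
def pvTruthy : Option (List String) → Bool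
  | none => false
  | some [] => false
  | some (_ :: _) => true

def apply_column_args_alt (records : List (List (String × String))) (select : Option (List String)) (exclude : Option (List String)) (reorder : Option (List String)) : List (List (String × String)) :=
  let reList := reorder.getD []            -- re_list = reorder or []
  let n : Int := (reList.length : Int)     -- n = len(re_list)
  records.map (fun recL =>
    let d := PySem.Dict.ofList recL
    let keys := d.keys                     -- keys = list(rec)
    let base := if pvTruthy select then select.getD [] else keys   -- base = select if select else keys
    let kept := keys.filter (fun k =>
      (!pvTruthy select || (select.getD []).contains k) &&
      (!pvTruthy exclude || !((exclude.getD []).contains k)))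
    (PySem.List.sorted kept (fun k =>
        if reList.contains k then (((PySem.List.index? reList k).getD 0 : Nat) : Int)
        else n + (((PySem.List.index? base k).getD 0 : Nat) : Int)) false).map
      (fun k => (k, d.getD k "")))

-- ===== PRECONDITION & SPEC =====
def Spec_apply_column_args (records : List (List (String × String))) (select : Option (List String)) (exclude : Option (List String)) (reorder : Option (List String)) (out : List (List (String × String))) : Prop := out = apply_column_args_alt records select exclude reorder
instance (records : List (List (String × String))) (select : Option (List String)) (exclude : Option (List String)) (reorder : Option (List String)) (out : List (List (String × String))) : Decidable (Spec_apply_column_args records select exclude reorder out) := by unfold Spec_apply_column_args; infer_instance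

-- ===== CLAIM (what is proved, stated in full; the proofs are below) =====
def Claim_equal_apply_column_args : Prop := ∀ (records : List (List (String × String))) (select : Option (List String)) (exclude : Option (List String)) (reorder : Option (List String)), Dom_apply_column_args records select exclude reorder → Spec_apply_column_args records select exclude reorder (apply_column_args records select exclude reorder)

-- ===== LEMMAS AND PROOFS =====

-- The final key order A produces per record, written as one key list (proof-side characterisation).
def pvAKeys (dd : PySem.Dict String String) (sel ex re : Option (List String)) : List String :=
  let keys0 := if pvTruthy sel then PySem.List.dedup ((sel.getD []).filter (fun k => dd.contains k)) else dd.keys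
  let keys1 := if pvTruthy ex then keys0.filter (fun k => !((ex.getD []).contains k)) else keys0
  if pvTruthy re then
    let front := PySem.List.dedup ((re.getD []).filter (fun k => keys1.contains k))
    front ++ keys1.filter (fun k => !front.contains k)
  else keys1

theorem pv_keys_proj (dd : PySem.Dict String String) (L : List String) :
    (PySem.Dict.mk (L.map (fun k => (k, dd.getD k "")))).keys = L := by
  simp only [PySem.Dict.keys]
  simp [Function.comp_def]

theorem pv_contains_proj (dd : PySem.Dict String String) (L : List String) (c : String) :
    (PySem.Dict.mk (L.map (fun k => (k, dd.getD k "")))).contains c = decide (c ∈ L) := by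
  rw [PySem.Dict.contains_eq_decide_mem_keys, pv_keys_proj]

theorem pv_getD_proj (dd : PySem.Dict String String) (L : List String) (hL : L.Nodup)
    (k : String) (hk : k ∈ L) :
    (PySem.Dict.mk (L.map (fun k => (k, dd.getD k "")))).getD k "" = dd.getD k "" := by
  apply PySem.Dict.getD_of_mem_items
  · exact List.mem_map_of_mem hk
  · rw [pv_keys_proj]; exact hL

theorem pv_selfold (dd : PySem.Dict String String) (s : List String) (L : List String) (hL : L.Nodup) :
    s.foldl (fun acc col => if dd.contains col then acc.insert col (dd.getD col "") else acc)
        (PySem.Dict.mk (L.map (fun k => (k, dd.getD k ""))))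
      = PySem.Dict.mk ((PySem.Set.update L (s.filter (fun k => dd.contains k))).map (fun k => (k, dd.getD k ""))) := by
  induction s generalizing L with
  | nil => rfl
  | cons c s ih =>
    rw [List.foldl_cons, List.filter_cons]
    by_cases hc : dd.contains c = true
    · rw [if_pos hc, if_pos hc]
      by_cases hm : c ∈ L
      · have hins : (PySem.Dict.mk (L.map (fun k => (k, dd.getD k "")))).insert c (dd.getD c "")
            = PySem.Dict.mk (L.map (fun k => (k, dd.getD k ""))) := by
          apply PySem.Dict.ext
          rw [PySem.Dict.items_insert_of_contains _ _ (by rw [pv_contains_proj]; simp [hm])]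
          show (L.map _).map _ = L.map _
          rw [List.map_map]
          apply List.map_congr_left
          intro k hk
          by_cases h : k = c
          · subst h; simp
          · simp [Function.comp, h]
        rw [hins, ih L hL, PySem.Set.update_cons, PySem.Set.add_of_mem hm]
      · have hins : (PySem.Dict.mk (L.map (fun k => (k, dd.getD k "")))).insert c (dd.getD c "")
            = PySem.Dict.mk ((L ++ [c]).map (fun k => (k, dd.getD k ""))) := by
          apply PySem.Dict.ext
          rw [PySem.Dict.items_insert_of_not_contains _ _ (by rw [pv_contains_proj]; simp [hm])]
          simp
        rw [hins, ih (L ++ [c]) (by simp [List.nodup_append, hL]; exact fun a ha h => hm (h ▸ ha)),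
          PySem.Set.update_cons, PySem.Set.add_of_not_mem hm]
    · rw [if_neg hc, if_neg hc, ih L hL]

theorem pv_filterfold (dd : PySem.Dict String String) (cond : String → Bool) (K M : List String)
    (hK : K.Nodup) (hM : ∀ k ∈ K, cond k = false → k ∉ M) :
    (K.map (fun k => (k, dd.getD k ""))).foldl
        (fun acc p => if cond p.1 then acc else acc.insert p.1 p.2)
        (PySem.Dict.mk (M.map (fun k => (k, dd.getD k ""))))
      = PySem.Dict.mk ((M ++ K.filter (fun k => !cond k)).map (fun k => (k, dd.getD k ""))) := by
  induction K generalizing M with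
  | nil => simp
  | cons k K ih =>
    rw [List.map_cons, List.foldl_cons, List.filter_cons]
    by_cases hc : cond k = true
    · rw [if_pos hc]
      have : (!cond k) = false := by simp [hc]
      rw [this, if_neg (by simp)]
      exact ih M hK.of_cons (fun k' hk' h => hM k' (List.mem_cons_of_mem _ hk') h)
    · have hcf : cond k = false := by simpa using hc
      have hkM : k ∉ M := hM k List.mem_cons_self hcf
      rw [if_neg (by simp [hcf])]
      have hins : (PySem.Dict.mk (M.map (fun k => (k, dd.getD k "")))).insert k (dd.getD k "")
          = PySem.Dict.mk ((M ++ [k]).map (fun k => (k, dd.getD k ""))) := by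
        apply PySem.Dict.ext
        rw [PySem.Dict.items_insert_of_not_contains _ _ (by rw [pv_contains_proj]; simp [hkM])]
        simp
      rw [hins, ih (M ++ [k]) hK.of_cons (fun k' hk' h => by
        simp only [List.mem_append, List.mem_singleton]
        rintro (h' | rfl)
        · exact hM k' (List.mem_cons_of_mem _ hk') h h'
        · exact (List.nodup_cons.mp hK).1 hk')]
      rw [(by simp [hcf] : (!cond k) = true), if_pos rfl]
      simp

theorem pv_select_eq (dd : PySem.Dict String String) (s : List String) :
    pvSelectCols dd s
      = PySem.Dict.mk ((PySem.List.dedup (s.filter (fun k => dd.contains k))).map (fun k => (k, dd.getD k ""))) := by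
  unfold pvSelectCols
  rw [PySem.List.dedup_eq_ofList, ← PySem.Set.update_nil_left]
  exact pv_selfold dd s [] List.nodup_nil

theorem pv_exclude_eq (dd : PySem.Dict String String) (K : List String) (hK : K.Nodup) (ex : List String) :
    pvExcludeCols (PySem.Dict.mk (K.map (fun k => (k, dd.getD k "")))) ex
      = PySem.Dict.mk ((K.filter (fun k => !ex.contains k)).map (fun k => (k, dd.getD k ""))) := by
  unfold pvExcludeCols
  exact pv_filterfold dd (fun k => ex.contains k) K [] hK (by simp)

theorem pv_reorder_eq (dd : PySem.Dict String String) (K : List String) (hK : K.Nodup) (r : List String) :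
    pvReorderCols (PySem.Dict.mk (K.map (fun k => (k, dd.getD k "")))) r
      = PySem.Dict.mk (((PySem.List.dedup (r.filter (fun k => K.contains k)))
          ++ K.filter (fun k => !(PySem.List.dedup (r.filter (fun k => K.contains k))).contains k)).map
            (fun k => (k, dd.getD k ""))) := by
  unfold pvReorderCols
  set S := PySem.List.dedup (r.filter (fun k => K.contains k)) with hS
  have hSsub : ∀ k ∈ S, k ∈ K := by
    intro k hk
    rw [hS, PySem.List.dedup_eq_ofList] at hk
    have := (PySem.Set.mem_ofList _ _).mp hk
    have := List.of_mem_filter this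
    simpa using this
  have hord : (r.foldl (fun acc k =>
        if (PySem.Dict.mk (K.map (fun k => (k, dd.getD k "")))).contains k then
          acc.insert k ((PySem.Dict.mk (K.map (fun k => (k, dd.getD k "")))).getD k "") else acc)
        PySem.Dict.empty)
      = PySem.Dict.mk (S.map (fun k => (k, dd.getD k ""))) := by
    refine (pv_selfold (PySem.Dict.mk (K.map (fun k => (k, dd.getD k "")))) r [] List.nodup_nil).trans ?_
    apply PySem.Dict.ext
    show List.map _ _ = List.map _ _
    rw [PySem.Set.update_nil_left, hS, PySem.List.dedup_eq_ofList]
    have hfil : r.filter (fun k => (PySem.Dict.mk (K.map (fun k => (k, dd.getD k "")))).contains k)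
        = r.filter (fun k => K.contains k) := by
      apply List.filter_congr
      intro k _
      rw [pv_contains_proj, List.contains_eq_mem]
    rw [hfil]
    apply List.map_congr_left
    intro k hk
    have hkK : k ∈ K := hSsub k (by rw [hS, PySem.List.dedup_eq_ofList]; exact hk)
    rw [pv_getD_proj dd K hK k hkK]
  rw [hord]
  show List.foldl _ (PySem.Dict.mk (S.map _)) (K.map (fun k => (k, dd.getD k ""))) = _
  rw [pv_filterfold dd (fun k => (PySem.Dict.mk (S.map (fun k => (k, dd.getD k "")))).contains k) K S hK
    (fun k _ h => by
      have h' : (PySem.Dict.mk (S.map (fun k => (k, dd.getD k "")))).contains k = false := h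
      rw [pv_contains_proj] at h'; simpa using h')]
  apply PySem.Dict.ext
  show List.map _ _ = List.map _ _
  congr 1
  congr 1
  apply List.filter_congr
  intro k _
  rw [pv_contains_proj, List.contains_eq_mem]

theorem pv_record (sel ex re : Option (List String)) (recL : List (String × String)) :
    (let rec0 := PySem.Dict.ofList recL
     let rec1 := match sel with | some (c :: cs) => pvSelectCols rec0 (c :: cs) | _ => rec0
     let rec2 := match ex with | some (c :: cs) => pvExcludeCols rec1 (c :: cs) | _ => rec1
     let rec3 := match re with | some (c :: cs) => pvReorderCols rec2 (c :: cs) | _ => rec2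
     rec3.items)
    = (pvAKeys (PySem.Dict.ofList recL) sel ex re).map (fun k => (k, (PySem.Dict.ofList recL).getD k "")) := by
  set dd := PySem.Dict.ofList recL with hdd
  have hnd : dd.keys.Nodup := PySem.Dict.nodup_keys_ofList recL
  have hbase : dd = PySem.Dict.mk (dd.keys.map (fun k => (k, dd.getD k ""))) :=
    PySem.Dict.ext (PySem.Dict.items_eq_map_keys dd hnd "")
  obtain ⟨K1, hK1, e1, e1k⟩ : ∃ K1 : List String, K1.Nodup ∧
      (match sel with | some (c :: cs) => pvSelectCols dd (c :: cs) | _ => dd)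
        = PySem.Dict.mk (K1.map (fun k => (k, dd.getD k ""))) ∧
      (if pvTruthy sel then PySem.List.dedup ((sel.getD []).filter (fun k => dd.contains k)) else dd.keys) = K1 := by
    rcases sel with _ | (_ | ⟨c, cs⟩)
    · exact ⟨dd.keys, hnd, hbase, by simp [pvTruthy]⟩
    · exact ⟨dd.keys, hnd, hbase, by simp [pvTruthy]⟩
    · exact ⟨_, PySem.List.nodup_dedup _, pv_select_eq dd (c :: cs), by simp [pvTruthy]⟩
  obtain ⟨K2, hK2, e2, e2k⟩ : ∃ K2 : List String, K2.Nodup ∧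
      (match ex with
        | some (c :: cs) => pvExcludeCols (PySem.Dict.mk (K1.map (fun k => (k, dd.getD k "")))) (c :: cs)
        | _ => PySem.Dict.mk (K1.map (fun k => (k, dd.getD k ""))))
        = PySem.Dict.mk (K2.map (fun k => (k, dd.getD k ""))) ∧
      (if pvTruthy ex then K1.filter (fun k => !((ex.getD []).contains k)) else K1) = K2 := by
    rcases ex with _ | (_ | ⟨c, cs⟩)
    · exact ⟨K1, hK1, rfl, by simp [pvTruthy]⟩
    · exact ⟨K1, hK1, rfl, by simp [pvTruthy]⟩
    · exact ⟨_, hK1.filter _, pv_exclude_eq dd K1 hK1 (c :: cs), by simp [pvTruthy]⟩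
  have e3 :
      (match re with
        | some (c :: cs) => pvReorderCols (PySem.Dict.mk (K2.map (fun k => (k, dd.getD k "")))) (c :: cs)
        | _ => PySem.Dict.mk (K2.map (fun k => (k, dd.getD k "")))) 
        = PySem.Dict.mk ((if pvTruthy re then
            (PySem.List.dedup ((re.getD []).filter (fun k => K2.contains k)))
                ++ K2.filter (fun k => !(PySem.List.dedup ((re.getD []).filter (fun k => K2.contains k))).contains k)
          else K2).map (fun k => (k, dd.getD k ""))) := by
    rcases re with _ | (_ | ⟨c, cs⟩)
    · simp [pvTruthy]
    · simp [pvTruthy]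
    · have := pv_reorder_eq dd K2 hK2 (c :: cs)
      simpa [pvTruthy] using this
  simp only [pvAKeys, e1, e2, e3, e1k, e2k]

-- ---- B-side toolbox: PySem dedup as a cons-recursion, first-index order facts ----

theorem pv_update_eq (l s : List String) :
    PySem.Set.update s l = s ++ (PySem.Set.ofList l).filter (fun y => !s.contains y) := by
  induction l generalizing s with
  | nil => simp [PySem.Set.update, PySem.Set.ofList]
  | cons x l ih =>
    have h0 : PySem.Set.ofList (x :: l) = PySem.Set.update [x] l := rfl
    rw [PySem.Set.update_cons, ih, h0, ih]
    by_cases hm : x ∈ s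
    · rw [PySem.Set.add_of_mem hm]
      simp only [List.filter_append, List.filter_filter]
      have h1 : [x].filter (fun y => !s.contains y) = [] := by
        simp [List.contains_eq_mem, hm]
      rw [h1]
      simp only [List.nil_append]
      congr 1
      apply List.filter_congr
      intro y _
      by_cases hyx : y = x
      · subst hyx; simp [List.contains_eq_mem, hm]
      · simp [List.contains_eq_mem, hyx]
    · rw [PySem.Set.add_of_not_mem hm]
      simp only [List.filter_append, List.filter_filter, List.append_assoc]
      have h1 : [x].filter (fun y => !s.contains y) = [x] := by
        simp [List.contains_eq_mem, hm]
      rw [h1]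
      congr 1
      congr 1
      apply List.filter_congr
      intro y _
      by_cases hyx : y = x
      · subst hyx; simp [List.contains_eq_mem, hm]
      · simp [List.contains_eq_mem, hyx]

theorem pv_dedup_cons (x : String) (xs : List String) :
    PySem.List.dedup (x :: xs) = x :: (PySem.List.dedup xs).filter (fun y => !(x == y)) := by
  rw [PySem.List.dedup_eq_ofList, PySem.List.dedup_eq_ofList]
  have h0 : PySem.Set.ofList (x :: xs) = PySem.Set.update [x] xs := rfl
  rw [h0, pv_update_eq]
  simp only [List.singleton_append, List.cons.injEq, true_and]
  apply List.filter_congr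
  intro y _
  cases hxy : x == y with
  | true =>
    have : x = y := eq_of_beq hxy
    subst this
    simp [List.contains_eq_mem]
  | false =>
    have hne : ¬ y = x := fun e => by subst e; simp at hxy
    simp [List.contains_eq_mem, hne]

theorem pv_dedup_pairwise (l : List String) :
    (PySem.List.dedup l).Pairwise (fun a b => List.idxOf a l < List.idxOf b l) := by
  induction l with
  | nil => exact List.Pairwise.nil
  | cons x xs ih =>
    rw [pv_dedup_cons]
    refine List.pairwise_cons.mpr ⟨?_, ?_⟩
    · intro b hb
      have hne : x ≠ b := by
        have := (List.mem_filter.mp hb).2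
        simpa using this
      rw [List.idxOf_cons_self, List.idxOf_cons_ne _ hne]
      omega
    · refine (ih.filter _).imp_of_mem ?_
      intro a b ha hb hab
      have hax : x ≠ a := by have := (List.mem_filter.mp ha).2; simpa using this
      have hbx : x ≠ b := by have := (List.mem_filter.mp hb).2; simpa using this
      rw [List.idxOf_cons_ne _ hax, List.idxOf_cons_ne _ hbx]
      omega

theorem pv_dedup_filter (p : String → Bool) (l : List String) :
    PySem.List.dedup (l.filter p) = (PySem.List.dedup l).filter p := by
  induction l with
  | nil => rfl
  | cons x xs ih =>
    by_cases hp : p x = true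
    · rw [List.filter_cons_of_pos hp, pv_dedup_cons, pv_dedup_cons, ih,
        List.filter_cons_of_pos hp]
      congr 1
      rw [List.filter_filter, List.filter_filter]
      apply List.filter_congr
      intro y _
      rw [Bool.and_comm]
    · have hpf : p x = false := by simpa using hp
      rw [List.filter_cons_of_neg (by simp [hpf]), ih, pv_dedup_cons,
        List.filter_cons_of_neg (by simp [hpf]), List.filter_filter]
      apply List.filter_congr
      intro y hy
      by_cases hyx : y = x
      · subst hyx; simp [hpf]
      · have hxy : ¬ x = y := fun e => hyx e.symm
        simp [hxy]

theorem pv_nodup_pairwise (l : List String) (h : l.Nodup) :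
    l.Pairwise (fun a b => List.idxOf a l < List.idxOf b l) := by
  induction l with
  | nil => exact List.Pairwise.nil
  | cons x xs ih =>
    obtain ⟨hx, hxs⟩ := List.nodup_cons.mp h
    refine List.pairwise_cons.mpr ⟨?_, ?_⟩
    · intro b hb
      have hne : x ≠ b := fun e => hx (e ▸ hb)
      rw [List.idxOf_cons_self, List.idxOf_cons_ne _ hne]
      omega
    · refine (ih hxs).imp_of_mem ?_
      intro a b ha hb hab
      have hax : x ≠ a := fun e => hx (e ▸ ha)
      have hbx : x ≠ b := fun e => hx (e ▸ hb)
      rw [List.idxOf_cons_ne _ hax, List.idxOf_cons_ne _ hbx]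
      omega

theorem pv_index_getD (l : List String) (k : String) (h : k ∈ l) :
    (PySem.List.index? l k).getD 0 = List.idxOf k l := by
  induction l with
  | nil => cases h
  | cons a t ih =>
    by_cases hk : a = k
    · subst hk
      rw [PySem.List.index?_cons_self, List.idxOf_cons_self]
      rfl
    · have hkt : k ∈ t := by
        rcases List.mem_cons.mp h with h' | h'
        · exact absurd h'.symm hk
        · exact h'
      rw [PySem.List.index?_cons_of_ne _ hk, List.idxOf_cons_ne _ hk]
      have hs : (PySem.List.index? t k).isSome := (PySem.List.index?_isSome_iff t k).mpr hkt
      cases hi : PySem.List.index? t k with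
      | none => rw [hi] at hs; simp at hs
      | some i =>
        have hit := ih hkt
        rw [hi] at hit
        simp at hit ⊢
        omega

-- B's single-rank sort of the kept keys equals A's front-then-rest key order.
theorem pv_sorted_generic (kept K2 base reList : List String)
    (hknd : kept.Nodup) (h2nd : K2.Nodup)
    (hmem : ∀ k, k ∈ K2 ↔ k ∈ kept)
    (hsub : ∀ k ∈ K2, k ∈ base)
    (hpw : K2.Pairwise (fun a b => List.idxOf a base < List.idxOf b base)) :
    PySem.List.sorted kept
      (fun k => if reList.contains k then (((PySem.List.index? reList k).getD 0 : Nat) : Int)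
        else (reList.length : Int) + (((PySem.List.index? base k).getD 0 : Nat) : Int)) false
    = PySem.List.dedup (reList.filter (fun k => K2.contains k))
        ++ K2.filter (fun k => !(PySem.List.dedup (reList.filter (fun k => K2.contains k))).contains k) := by
  set F := PySem.List.dedup (reList.filter (fun k => K2.contains k)) with hF
  have hFnd : F.Nodup := PySem.List.nodup_dedup _
  have hFsubRe : ∀ k ∈ F, k ∈ reList := by
    intro k hk
    rw [hF, PySem.List.mem_dedup] at hk
    exact (List.mem_filter.mp hk).1
  have hFsub2 : ∀ k ∈ F, k ∈ K2 := by
    intro k hk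
    rw [hF, PySem.List.mem_dedup] at hk
    have h2 := (List.mem_filter.mp hk).2
    simpa [List.contains_eq_mem] using h2
  have hnotF : ∀ k ∈ K2, k ∉ F → k ∉ reList := by
    intro k hk2 hkF hkRe
    apply hkF
    rw [hF, PySem.List.mem_dedup]
    exact List.mem_filter.mpr ⟨hkRe, by simp [List.contains_eq_mem, hk2]⟩
  have hRnd : (K2.filter (fun k => !F.contains k)).Nodup := h2nd.filter _
  have hLnd : (F ++ K2.filter (fun k => !F.contains k)).Nodup := by
    rw [List.nodup_append]
    refine ⟨hFnd, hRnd, ?_⟩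
    intro a haF b hbR e
    subst e
    have := (List.mem_filter.mp hbR).2
    simp [List.contains_eq_mem, haF] at this
  have hLmem : ∀ k, k ∈ F ++ K2.filter (fun k => !F.contains k) ↔ k ∈ kept := by
    intro k
    rw [List.mem_append, List.mem_filter]
    constructor
    · rintro (h | h)
      · exact (hmem k).mp (hFsub2 k h)
      · exact (hmem k).mp h.1
    · intro h
      have h2 : k ∈ K2 := (hmem k).mpr h
      by_cases hf : k ∈ F
      · exact Or.inl hf
      · exact Or.inr ⟨h2, by simp [List.contains_eq_mem, hf]⟩
  have hperm : (F ++ K2.filter (fun k => !F.contains k)).Perm kept :=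
    (List.perm_ext_iff_of_nodup hLnd hknd).mpr hLmem
  refine PySem.List.sorted_eq_of_perm_of_pairwise_lt _ _ _ hperm ?_
  rw [List.pairwise_append]
  refine ⟨?_, ?_, ?_⟩
  · have hFpw : F.Pairwise (fun a b => List.idxOf a reList < List.idxOf b reList) := by
      rw [hF, pv_dedup_filter]
      exact (pv_dedup_pairwise reList).filter _
    refine hFpw.imp_of_mem ?_
    intro a b ha hb hab
    have haRe := hFsubRe a ha
    have hbRe := hFsubRe b hb
    rw [if_pos (by simp [List.contains_eq_mem, haRe]), if_pos (by simp [List.contains_eq_mem, hbRe]),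
      pv_index_getD _ _ haRe, pv_index_getD _ _ hbRe]
    exact_mod_cast hab
  · refine (hpw.filter _).imp_of_mem ?_
    intro a b ha hb hab
    have ha2 := List.mem_filter.mp ha
    have hb2 := List.mem_filter.mp hb
    have haNotF : a ∉ F := by simpa [List.contains_eq_mem] using ha2.2
    have hbNotF : b ∉ F := by simpa [List.contains_eq_mem] using hb2.2
    have haRe : a ∉ reList := hnotF a ha2.1 haNotF
    have hbRe : b ∉ reList := hnotF b hb2.1 hbNotF
    rw [if_neg (by simp [List.contains_eq_mem, haRe]), if_neg (by simp [List.contains_eq_mem, hbRe]),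
      pv_index_getD base a (hsub a ha2.1), pv_index_getD base b (hsub b hb2.1)]
    omega
  · intro a ha b hb
    have haRe := hFsubRe a ha
    have hb2 := List.mem_filter.mp hb
    have hbNotF : b ∉ F := by simpa [List.contains_eq_mem] using hb2.2
    have hbRe : b ∉ reList := hnotF b hb2.1 hbNotF
    rw [if_pos (by simp [List.contains_eq_mem, haRe]), if_neg (by simp [List.contains_eq_mem, hbRe]),
      pv_index_getD _ _ haRe]
    have hlt : List.idxOf a reList < reList.length := List.idxOf_lt_length_of_mem haRe
    omega

theorem pv_falsy (o : Option (List String)) (h : pvTruthy o = false) : o.getD [] = [] := by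
  cases o with
  | none => rfl
  | some l =>
    cases l with
    | nil => rfl
    | cons a t => simp [pvTruthy] at h

theorem pv_sorted_keys (dd : PySem.Dict String String) (hnd : dd.keys.Nodup)
    (sel ex re : Option (List String)) :
    PySem.List.sorted
      (dd.keys.filter (fun k =>
        (!pvTruthy sel || (sel.getD []).contains k) &&
        (!pvTruthy ex || !((ex.getD []).contains k))))
      (fun k =>
        if (re.getD []).contains k then (((PySem.List.index? (re.getD []) k).getD 0 : Nat) : Int)
        else ((re.getD []).length : Int) + (((PySem.List.index? (if pvTruthy sel then sel.getD [] else dd.keys) k).getD 0 : Nat) : Int))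
      false
    = pvAKeys dd sel ex re := by
  simp only [pvAKeys]
  set base := (if pvTruthy sel then sel.getD [] else dd.keys) with hbase
  set K0 := (if pvTruthy sel then PySem.List.dedup ((sel.getD []).filter (fun k => dd.contains k)) else dd.keys) with hK0
  set K2 := (if pvTruthy ex then K0.filter (fun k => !((ex.getD []).contains k)) else K0) with hK2
  set kept := dd.keys.filter (fun k =>
    (!pvTruthy sel || (sel.getD []).contains k) &&
    (!pvTruthy ex || !((ex.getD []).contains k))) with hkeptDef
  have hknd : kept.Nodup := hnd.filter _
  obtain ⟨hK0nd, hK0mem, hK0sub, hK0pw⟩ :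
      K0.Nodup ∧ (∀ k, k ∈ K0 ↔ k ∈ dd.keys ∧ ((!pvTruthy sel || (sel.getD []).contains k) = true))
        ∧ (∀ k ∈ K0, k ∈ base) ∧ K0.Pairwise (fun a b => List.idxOf a base < List.idxOf b base) := by
    by_cases hsel : pvTruthy sel = true
    · rw [hK0, if_pos hsel, hbase, if_pos hsel]
      refine ⟨PySem.List.nodup_dedup _, ?_, ?_, ?_⟩
      · intro k
        simp [List.mem_filter, PySem.Dict.contains_eq_decide_mem_keys,
          List.contains_eq_mem, hsel, and_comm]
      · intro k hk
        rw [PySem.List.mem_dedup] at hk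
        exact (List.mem_filter.mp hk).1
      · rw [pv_dedup_filter]
        exact (pv_dedup_pairwise _).filter _
    · have hself : pvTruthy sel = false := by simpa using hsel
      rw [hK0, if_neg (by simp [hself]), hbase, if_neg (by simp [hself])]
      refine ⟨hnd, ?_, fun k hk => hk, pv_nodup_pairwise _ hnd⟩
      intro k
      simp [hself]
  obtain ⟨hK2nd, hK2mem, hK2sub, hK2pw⟩ :
      K2.Nodup ∧ (∀ k, k ∈ K2 ↔ k ∈ K0 ∧ ((!pvTruthy ex || !((ex.getD []).contains k)) = true))
        ∧ (∀ k ∈ K2, k ∈ base) ∧ K2.Pairwise (fun a b => List.idxOf a base < List.idxOf b base) := by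
    by_cases hex : pvTruthy ex = true
    · rw [hK2, if_pos hex]
      exact ⟨hK0nd.filter _, fun k => by simp [List.mem_filter, hex, List.contains_eq_mem],
        fun k hk => hK0sub k (List.mem_filter.mp hk).1, hK0pw.filter _⟩
    · have hexf : pvTruthy ex = false := by simpa using hex
      rw [hK2, if_neg (by simp [hexf])]
      exact ⟨hK0nd, fun k => by simp [hexf], hK0sub, hK0pw⟩
  have hmem : ∀ k, k ∈ K2 ↔ k ∈ kept := by
    intro k
    rw [hK2mem k, hK0mem k, hkeptDef, List.mem_filter]
    simp only [Bool.and_eq_true, and_assoc]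
  by_cases hre : pvTruthy re = true
  · rw [if_pos hre]
    exact pv_sorted_generic kept K2 base (re.getD []) hknd hK2nd hmem hK2sub hK2pw
  · have href : pvTruthy re = false := by simpa using hre
    rw [if_neg (by simp [href]), pv_falsy re href]
    refine (pv_sorted_generic kept K2 base [] hknd hK2nd hmem hK2sub hK2pw).trans ?_
    simp

theorem pv_brecord (sel ex re : Option (List String)) (recL : List (String × String)) :
    (let d := PySem.Dict.ofList recL
     let keys := d.keys
     let base := if pvTruthy sel then sel.getD [] else keys
     let kept := keys.filter (fun k =>
       (!pvTruthy sel || (sel.getD []).contains k) &&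
       (!pvTruthy ex || !((ex.getD []).contains k)))
     (PySem.List.sorted kept (fun k =>
         if (re.getD []).contains k then (((PySem.List.index? (re.getD []) k).getD 0 : Nat) : Int)
         else ((re.getD []).length : Int) + (((PySem.List.index? base k).getD 0 : Nat) : Int)) false).map
       (fun k => (k, d.getD k "")))
    = (pvAKeys (PySem.Dict.ofList recL) sel ex re).map (fun k => (k, (PySem.Dict.ofList recL).getD k "")) := by
  have hnd : (PySem.Dict.ofList recL).keys.Nodup := PySem.Dict.nodup_keys_ofList recL
  simp only []
  rw [pv_sorted_keys (PySem.Dict.ofList recL) hnd sel ex re]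

-- ===== VERDICT (by name: the statement is the Claim_ definition above) =====
theorem apply_column_args_spec : Claim_equal_apply_column_args := by
  intro records sel ex re _
  unfold Spec_apply_column_args apply_column_args apply_column_args_alt
  exact List.map_congr_left (fun recL _ =>
    (pv_record sel ex re recL).trans (pv_brecord sel ex re recL).symm)
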